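-- pv_equiv track=rewrite | github.com/NewNLPer/nlp_Learnning | daily learn/7.28.py | function33
-- ===== SOURCE A (Python) =====
-- def function33(nums):###左边第一个比自己小的
--     res=['*']*len(nums)
--     stack=[]
--     for i in range(len(nums)):
--         while stack and nums[stack[-1]]>nums[i]:
--             stack.pop()
--         if stack:
--             res[i]=stack[-1]
--         stack.append(i)
--     res1=0
--     for j in range(len(res)):
--         if res[j]!='*':
--             res2=res[j]
--             while res[res2]!='*':
--                 res3=res[res2]
--                 res2=res3
--             res1=max(res1,j-res2)
--     return res1
-- ===== SOURCE B (Python) =====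
-- def function33(nums):
--     # One O(n) pass: the chain of left-smaller-or-equal pointers from any j
--     # ends at the first occurrence of the minimum of nums[0..j], so the answer
--     # is max over j of j minus that first-minimum index.
--     best = 0
--     m = 0  # index of the first occurrence of the minimum of nums[0..j-1]
--     for j in range(1, len(nums)):
--         if nums[j] < nums[m]:
--             m = j
--         else:
--             best = max(best, j - m)
--     return best
-- ===== Notes on version B (the rewrite author's own statement) =====
-- stated objective: faster
-- what changed: A builds a monotonic-stack pointer array and then re-chases each left-smaller-or-equal chain to its root (quadratic); B uses the fact that every chain ends at the first occurrence of the prefix minimum, so one pass tracking that index and max(j - m) suffices.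
import Mathlib
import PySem

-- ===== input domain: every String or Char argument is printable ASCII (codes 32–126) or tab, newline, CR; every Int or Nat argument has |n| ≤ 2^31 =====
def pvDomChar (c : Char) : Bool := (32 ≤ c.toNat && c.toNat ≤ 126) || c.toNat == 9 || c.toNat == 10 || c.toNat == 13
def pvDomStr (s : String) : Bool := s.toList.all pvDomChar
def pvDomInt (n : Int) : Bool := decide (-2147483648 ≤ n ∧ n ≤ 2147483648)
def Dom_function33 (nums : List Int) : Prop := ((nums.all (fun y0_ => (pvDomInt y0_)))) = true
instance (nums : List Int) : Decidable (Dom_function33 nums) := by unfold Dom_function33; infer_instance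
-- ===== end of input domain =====

-- B replaces A's stack-plus-chain-chasing (quadratic) by a single prefix-minimum scan (linear); same value on every input.

-- ===== PORT A =====
-- All index accesses in A are in range (indices come from range(len(nums)) and from the
-- stack of previously pushed indices), so nums[k] is ported exactly as nums.getD k 0.

-- the inner `while stack and nums[stack[-1]]>nums[i]: stack.pop()` loop (head of the list = top)
def popWhileA (nums : List Int) (i : Nat) (stack : List Nat) : List Nat :=
  match stack with
  | [] => []
  | t :: rest => if nums.getD i 0 < nums.getD t 0 then popWhileA nums i rest else t :: rest

-- one iteration of A's first for-loop: state = (res, stack)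
def stepA (nums : List Int) (st : List (Option Nat) × List Nat) (i : Nat) :
    List (Option Nat) × List Nat :=
  let stack' := popWhileA nums i st.2
  let res' :=
    match stack' with
    | [] => st.1
    | t :: _ => st.1.set i (some t)
  (res', i :: stack')

-- res after the first for-loop ('*' ported as none)
def buildResA (nums : List Int) : List (Option Nat) :=
  ((List.range nums.length).foldl (stepA nums) (List.replicate nums.length none, [])).1

-- the inner `while res[res2]!='*': res2 = res[res2]` loop; every step strictly decreases
-- res2 on the arrays buildResA produces, so fuel = res.length always suffices
def chaseA (res : List (Option Nat)) (fuel : Nat) (r2 : Nat) : Nat :=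
  match fuel with
  | 0 => r2
  | f + 1 =>
    match res.getD r2 none with
    | none => r2
    | some r3 => chaseA res f r3

def function33 (nums : List Int) : Int :=
  let res := buildResA nums
  (List.range res.length).foldl
    (fun r1 j =>
      match res.getD j none with
      | none => r1
      | some p => max r1 ((j : Int) - (chaseA res res.length p : Int))) 0

-- ===== PORT B =====
-- state = (best, m); m = index of the first occurrence of the minimum of nums[0..j-1]
def stepB (nums : List Int) (st : Int × Nat) (j : Nat) : Int × Nat :=
  if nums.getD j 0 < nums.getD st.2 0 then (st.1, j)
  else (max st.1 ((j : Int) - (st.2 : Int)), st.2)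

def function33_alt (nums : List Int) : Int :=
  ((List.range' 1 (nums.length - 1)).foldl (stepB nums) (0, 0)).1  -- range(1, len(nums))

-- ===== PRECONDITION & SPEC =====
def Spec_function33 (nums : List Int) (out : Int) : Prop := out = function33_alt nums
instance (nums : List Int) (out : Int) : Decidable (Spec_function33 nums out) := by unfold Spec_function33; infer_instance

-- ===== CLAIM (what is proved, stated in full; the proofs are below) =====
def Claim_equal_function33 : Prop := ∀ (nums : List Int), Dom_function33 nums → Spec_function33 nums (function33 nums)

-- ===== LEMMAS AND PROOFS =====

-- nearest previous index with value ≤ v, searching down from k-1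
def nseAux (nums : List Int) (v : Int) : Nat → Option Nat
  | 0 => none
  | k + 1 => if nums.getD k 0 ≤ v then some k else nseAux nums v k

-- A's res[j]: nearest k < j with nums[k] ≤ nums[j]
def nse (nums : List Int) (j : Nat) : Option Nat := nseAux nums (nums.getD j 0) j

-- first index of the minimum of nums[0..j]
def fmi (nums : List Int) : Nat → Nat
  | 0 => 0
  | j + 1 => if nums.getD (j + 1) 0 < nums.getD (fmi nums j) 0 then j + 1 else fmi nums j

-- proof-side generalisation of popWhileA over the threshold value
def popV (nums : List Int) (v : Int) : List Nat → List Nat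
  | [] => []
  | t :: rest => if v < nums.getD t 0 then popV nums v rest else t :: rest

-- the stack after A's first loop has processed indices 0..i-1
def Sstk (nums : List Int) : Nat → List Nat
  | 0 => []
  | i + 1 => i :: popV nums (nums.getD i 0) (Sstk nums i)

-- abstract form of A's second loop
def Fa (nums : List Int) : Nat → Int
  | 0 => 0
  | j + 1 =>
    match nse nums j with
    | none => Fa nums j
    | some _ => max (Fa nums j) ((j : Int) - (fmi nums j : Int))

theorem nseAux_none (nums : List Int) (v : Int) (j : Nat) :
    nseAux nums v j = none ↔ ∀ k < j, v < nums.getD k 0 := by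
  induction j with
  | zero => simp [nseAux]
  | succ k ih =>
    simp only [nseAux]
    split_ifs with h
    · constructor
      · intro hc; cases hc
      · intro hall; exact absurd (hall k (Nat.lt_succ_self k)) (not_lt.mpr h)
    · rw [ih]
      constructor
      · intro hall l hl
        rcases Nat.lt_succ_iff_lt_or_eq.mp hl with h' | h'
        · exact hall l h'
        · subst h'; exact lt_of_not_ge h
      · intro hall l hl; exact hall l (Nat.lt_succ_of_lt hl)

theorem nseAux_some (nums : List Int) (v : Int) (j p : Nat)
    (h : nseAux nums v j = some p) :
    p < j ∧ nums.getD p 0 ≤ v ∧ ∀ l, p < l → l < j → v < nums.getD l 0 := by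
  induction j with
  | zero => simp [nseAux] at h
  | succ k ih =>
    simp only [nseAux] at h
    split_ifs at h with hle
    · cases h
      exact ⟨Nat.lt_succ_self _, hle, fun l h1 h2 => absurd h2 (by omega)⟩
    · obtain ⟨h1, h2, h3⟩ := ih h
      refine ⟨Nat.lt_succ_of_lt h1, h2, fun l hl1 hl2 => ?_⟩
      rcases Nat.lt_succ_iff_lt_or_eq.mp hl2 with h' | h'
      · exact h3 l hl1 h'
      · subst h'; exact lt_of_not_ge hle

theorem popWhileA_eq_popV (nums : List Int) (i : Nat) (st : List Nat) :
    popWhileA nums i st = popV nums (nums.getD i 0) st := by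
  induction st with
  | nil => rfl
  | cons t rest ih => simp [popWhileA, popV, ih]

theorem popV_popV (nums : List Int) (v w : Int) (hvw : v ≤ w) (st : List Nat) :
    popV nums v (popV nums w st) = popV nums v st := by
  induction st with
  | nil => rfl
  | cons t rest ih =>
    simp only [popV]
    by_cases h : w < nums.getD t 0
    · rw [if_pos h, if_pos (lt_of_le_of_lt hvw h), ih]
    · rw [if_neg h]
      simp only [popV]

theorem Sstk_head (nums : List Int) (i : Nat) (v : Int) :
    (popV nums v (Sstk nums i)).head? = nseAux nums v i := by
  induction i generalizing v with
  | zero => rfl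
  | succ k ih =>
    simp only [Sstk, nseAux, popV]
    by_cases h : nums.getD k 0 ≤ v
    · rw [if_neg (not_lt.mpr h), if_pos h]
      rfl
    · have hlt : v < nums.getD k 0 := lt_of_not_ge h
      rw [if_pos hlt, if_neg h,
        popV_popV nums v (nums.getD k 0) (le_of_lt hlt), ih]

theorem buildRes_inv (nums : List Int) (i : Nat) (hi : i ≤ nums.length) :
    let st := (List.range i).foldl (stepA nums)
      (List.replicate nums.length none, ([] : List Nat))
    st.2 = Sstk nums i ∧ st.1.length = nums.length ∧
      ∀ j, st.1.getD j none = if j < i then nse nums j else none := by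
  induction i with
  | zero =>
    refine ⟨rfl, by simp, fun j => by simp [List.getD]⟩
  | succ k ih =>
    obtain ⟨hstk, hlen, hres⟩ := ih (Nat.le_of_succ_le hi)
    rw [List.range_succ, List.foldl_append, List.foldl_cons, List.foldl_nil]
    set st := (List.range k).foldl (stepA nums)
      (List.replicate nums.length none, ([] : List Nat)) with hst
    have hpop : popWhileA nums k st.2 = popV nums (nums.getD k 0) (Sstk nums k) := by
      rw [hstk, popWhileA_eq_popV]
    have hhead : (popV nums (nums.getD k 0) (Sstk nums k)).head? = nse nums k :=
      Sstk_head nums k (nums.getD k 0)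
    rcases hcase : popV nums (nums.getD k 0) (Sstk nums k) with _ | ⟨t, rest⟩
    · have hnse : nse nums k = none := by rw [← hhead, hcase]; rfl
      have hA : stepA nums st k = (st.1, k :: popV nums (nums.getD k 0) (Sstk nums k)) := by
        simp only [stepA, hpop, hcase]
      rw [hA]
      refine ⟨by rw [Sstk], hlen, fun j => ?_⟩
      rw [hres j]
      by_cases hj : j < k
      · simp [hj, Nat.lt_succ_of_lt hj]
      · by_cases hj' : j = k
        · subst hj'; simp [hnse]
        · have h1 : ¬ j < k + 1 := by omega
          simp [hj, h1]
    · have hnse : nse nums k = some t := by rw [← hhead, hcase]; rfl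
      have hA : stepA nums st k
          = (st.1.set k (some t), k :: popV nums (nums.getD k 0) (Sstk nums k)) := by
        simp only [stepA, hpop, hcase]
      rw [hA]
      have hklen : k < st.1.length := by omega
      refine ⟨by rw [Sstk], by simp [hlen], fun j => ?_⟩
      by_cases hj : j = k
      · subst hj
        simp [List.getD, hklen, hnse]
      · rw [List.getD, List.getElem?_set_ne (by omega), ← List.getD, hres j]
        by_cases hj' : j < k
        · simp [hj', Nat.lt_succ_of_lt hj']
        · have h1 : ¬ j < k + 1 := by omega
          simp [hj', h1]

theorem buildResA_getD (nums : List Int) (j : Nat) :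
    (buildResA nums).getD j none = if j < nums.length then nse nums j else none :=
  (buildRes_inv nums nums.length le_rfl).2.2 j

theorem buildResA_length (nums : List Int) :
    (buildResA nums).length = nums.length :=
  (buildRes_inv nums nums.length le_rfl).2.1

theorem fmi_le (nums : List Int) (j : Nat) : fmi nums j ≤ j := by
  induction j with
  | zero => simp [fmi]
  | succ k ih => simp only [fmi]; split_ifs <;> omega

theorem fmi_min (nums : List Int) (j : Nat) :
    ∀ k ≤ j, nums.getD (fmi nums j) 0 ≤ nums.getD k 0 := by
  induction j with
  | zero =>
    intro k hk
    have hk0 : k = 0 := Nat.le_zero.mp hk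
    subst hk0
    simp [fmi]
  | succ m ih =>
    intro k hk
    simp only [fmi]
    split_ifs with h
    · rcases Nat.le_succ_iff.mp hk with h' | h'
      · exact le_of_lt (lt_of_lt_of_le h (ih k h'))
      · subst h'; exact le_rfl
    · rcases Nat.le_succ_iff.mp hk with h' | h'
      · exact ih k h'
      · subst h'; exact le_of_not_gt (by simpa using h)

theorem fmi_first (nums : List Int) (j : Nat) :
    ∀ k < fmi nums j, nums.getD (fmi nums j) 0 < nums.getD k 0 := by
  induction j with
  | zero => intro k hk; simp [fmi] at hk
  | succ m ih =>
    intro k hk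
    simp only [fmi] at hk ⊢
    split_ifs with h
    · rw [if_pos h] at hk
      exact lt_of_lt_of_le h (fmi_min nums m k (by have := fmi_le nums m; omega))
    · rw [if_neg h] at hk
      exact ih k hk

theorem nse_none_fmi (nums : List Int) (j : Nat) (h : nse nums j = none) :
    fmi nums j = j := by
  have hall : ∀ k < j, nums.getD j 0 < nums.getD k 0 := (nseAux_none nums _ j).mp h
  by_contra hne
  have hlt : fmi nums j < j := lt_of_le_of_ne (fmi_le nums j) hne
  exact absurd (fmi_min nums j j le_rfl) (not_le.mpr (hall _ hlt))

theorem fmi_eq_of_nse (nums : List Int) (j p : Nat) (h : nse nums j = some p) :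
    fmi nums p = fmi nums j := by
  obtain ⟨hpj, hple, hmax⟩ := nseAux_some nums _ j p h
  have hfle : fmi nums j ≤ p := by
    by_contra hgt
    rw [not_le] at hgt
    have hfj : fmi nums j ≤ j := fmi_le nums j
    by_cases he : fmi nums j = j
    · exact absurd hple (not_le.mpr (by rw [← he] at hpj ⊢; exact fmi_first nums j p hpj))
    · have h1 : fmi nums j < j := lt_of_le_of_ne hfj he
      have h2 : nums.getD j 0 < nums.getD (fmi nums j) 0 := hmax _ hgt h1
      exact absurd (fmi_min nums j j le_rfl) (not_le.mpr h2)
  have h1 : nums.getD (fmi nums p) 0 ≤ nums.getD (fmi nums j) 0 :=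
    fmi_min nums p (fmi nums j) hfle
  have h2 : nums.getD (fmi nums j) 0 ≤ nums.getD (fmi nums p) 0 :=
    fmi_min nums j (fmi nums p) (le_trans (fmi_le nums p) (le_of_lt hpj))
  have heq : nums.getD (fmi nums p) 0 = nums.getD (fmi nums j) 0 := le_antisymm h1 h2
  rcases lt_trichotomy (fmi nums p) (fmi nums j) with h' | h' | h'
  · exact absurd (fmi_first nums j _ h') (by rw [heq]; exact lt_irrefl _)
  · exact h'
  · exact absurd (fmi_first nums p _ h') (by rw [heq]; exact lt_irrefl _)

theorem chase_eq (nums : List Int) (x : Nat) (hx : x < nums.length) :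
    ∀ fuel, x ≤ fuel → chaseA (buildResA nums) fuel x = fmi nums x := by
  induction x using Nat.strong_induction_on with
  | _ x ih =>
    intro fuel hfuel
    cases fuel with
    | zero =>
      have hx0 : x = 0 := Nat.le_zero.mp hfuel
      subst hx0; rfl
    | succ f =>
      simp only [chaseA, buildResA_getD nums x, if_pos hx]
      cases hnse : nse nums x with
      | none => exact (nse_none_fmi nums x hnse).symm
      | some p =>
        obtain ⟨hpx, _, _⟩ := nseAux_some nums _ x p hnse
        show chaseA (buildResA nums) f p = fmi nums x
        rw [ih p hpx (lt_trans hpx hx) f (by omega)]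
        exact fmi_eq_of_nse nums x p hnse

theorem A_eq_F (nums : List Int) : function33 nums = Fa nums nums.length := by
  have key : ∀ i ≤ nums.length,
      (List.range i).foldl
        (fun r1 j =>
          match (buildResA nums).getD j none with
          | none => r1
          | some p => max r1 ((j : Int) - (chaseA (buildResA nums) nums.length p : Int))) 0
      = Fa nums i := by
    intro i hi
    induction i with
    | zero => rfl
    | succ k ihk =>
      rw [List.range_succ, List.foldl_append, List.foldl_cons, List.foldl_nil,
        ihk (Nat.le_of_succ_le hi)]
      have hk : k < nums.length := hi
      rw [buildResA_getD nums k, if_pos hk]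
      cases hnse : nse nums k with
      | none => simp only [Fa, hnse]
      | some p =>
        obtain ⟨hpk, _, _⟩ := nseAux_some nums _ k p hnse
        have hplen : p < nums.length := lt_trans hpk hk
        show max (Fa nums k) (((k : Nat) : Int) - (chaseA (buildResA nums) nums.length p : Int))
          = Fa nums (k + 1)
        rw [chase_eq nums p hplen nums.length (le_of_lt hplen),
          fmi_eq_of_nse nums k p hnse]
        simp only [Fa, hnse]
  simp only [function33]
  rw [buildResA_length]
  exact key nums.length le_rfl

theorem nse_succ_none (nums : List Int) (i : Nat)
    (h : nums.getD (i + 1) 0 < nums.getD (fmi nums i) 0) :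
    nse nums (i + 1) = none := by
  apply (nseAux_none nums _ (i + 1)).mpr
  intro k hk
  exact lt_of_lt_of_le h (fmi_min nums i k (by omega))

theorem nse_succ_some (nums : List Int) (i : Nat)
    (h : ¬ nums.getD (i + 1) 0 < nums.getD (fmi nums i) 0) :
    ∃ p, nse nums (i + 1) = some p := by
  cases hn : nse nums (i + 1) with
  | none =>
    have := (nseAux_none nums _ (i + 1)).mp hn (fmi nums i)
      (by have := fmi_le nums i; omega)
    omega
  | some p => exact ⟨p, rfl⟩

theorem B_inv (nums : List Int) (i : Nat) :
    (List.range' 1 i).foldl (stepB nums) (0, 0) = (Fa nums (i + 1), fmi nums i) := by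
  induction i with
  | zero => simp [Fa, nse, nseAux, fmi]
  | succ k ihk =>
    rw [List.range'_1_concat, List.foldl_append, List.foldl_cons, List.foldl_nil, ihk]
    have h1k : 1 + k = k + 1 := by omega
    rw [h1k]
    simp only [stepB]
    by_cases h : nums.getD (k + 1) 0 < nums.getD (fmi nums k) 0
    · rw [if_pos h]
      have hnone := nse_succ_none nums k h
      have hfmi : fmi nums (k + 1) = k + 1 := by simp only [fmi]; rw [if_pos h]
      show (Fa nums (k + 1), k + 1) = (Fa nums (k + 2), fmi nums (k + 1))
      rw [hfmi]
      have : Fa nums (k + 2) = Fa nums (k + 1) := by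
        show (match nse nums (k+1) with
          | none => Fa nums (k+1)
          | some _ => max (Fa nums (k+1)) (((k+1 : Nat) : Int) - (fmi nums (k+1) : Int))) = _
        rw [hnone]
      rw [this]
    · rw [if_neg h]
      obtain ⟨p, hsome⟩ := nse_succ_some nums k h
      have hfmi : fmi nums (k + 1) = fmi nums k := by simp only [fmi]; rw [if_neg h]
      show (max (Fa nums (k + 1)) (((k+1 : Nat) : Int) - (fmi nums k : Int)), fmi nums k)
        = (Fa nums (k + 2), fmi nums (k + 1))
      rw [hfmi]
      have : Fa nums (k + 2)
          = max (Fa nums (k + 1)) (((k+1 : Nat) : Int) - (fmi nums (k+1) : Int)) := by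
        show (match nse nums (k+1) with
          | none => Fa nums (k+1)
          | some _ => max (Fa nums (k+1)) (((k+1 : Nat) : Int) - (fmi nums (k+1) : Int))) = _
        rw [hsome]
      rw [this, hfmi]

theorem B_eq_F (nums : List Int) : function33_alt nums = Fa nums nums.length := by
  unfold function33_alt
  rw [B_inv nums (nums.length - 1)]
  cases hn : nums.length with
  | zero =>
    simp only []
    show Fa nums (0 - 1 + 1) = Fa nums 0
    norm_num [Fa, nse, nseAux]
  | succ m =>
    show Fa nums (Nat.succ m - 1 + 1) = Fa nums (Nat.succ m)
    norm_num

-- ===== VERDICT (by name: the statement is the Claim_ definition above) =====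
theorem function33_spec : Claim_equal_function33 := by
  intro nums _
  show function33 nums = function33_alt nums
  rw [A_eq_F, B_eq_F]
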